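-- pv_equiv track=rewrite | github.com/sharma-anubhav/CustomEncryption | encryption.py | encrypt2
-- ===== SOURCE A (Python) =====
-- def encrypt2(line):
--
--     encryption_key = 232895080984906726156709911474167313427
--     binary = ""
--     for i in line:
--         binary = binary + str(format(ord(i), 'b').zfill(32))
--     i = 0
--     crypt = ""
--     while (len(crypt)<len(binary)):
--         alphabet = binary[i:i + 128].zfill(128)
--         new = int(alphabet, 2) ^ encryption_key
--         crypt = crypt + str(format(new, 'b').zfill(128))
--         i += 128
--     return crypt
-- ===== SOURCE B (Python) =====
-- def encrypt2(line):
--     encryption_key = 232895080984906726156709911474167313427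
--     out = []
--     i = 0
--     while i < len(line):
--         val = 0
--         for c in line[i:i + 4]:
--             val = (val << 32) | ord(c)
--         out.append(format(val ^ encryption_key, 'b').zfill(128))
--         i += 4
--     return ''.join(out)
-- ===== Notes on version B (the rewrite author's own statement) =====
-- stated objective: faster
-- what changed: B drops the intermediate full binary string and its re-slicing at 128-bit boundaries: it walks the input in groups of 4 characters and builds each 128-bit chunk value arithmetically (shift/or of the char codes) before XORing, a single pass with no quadratic string concatenation.
import Mathlib
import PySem

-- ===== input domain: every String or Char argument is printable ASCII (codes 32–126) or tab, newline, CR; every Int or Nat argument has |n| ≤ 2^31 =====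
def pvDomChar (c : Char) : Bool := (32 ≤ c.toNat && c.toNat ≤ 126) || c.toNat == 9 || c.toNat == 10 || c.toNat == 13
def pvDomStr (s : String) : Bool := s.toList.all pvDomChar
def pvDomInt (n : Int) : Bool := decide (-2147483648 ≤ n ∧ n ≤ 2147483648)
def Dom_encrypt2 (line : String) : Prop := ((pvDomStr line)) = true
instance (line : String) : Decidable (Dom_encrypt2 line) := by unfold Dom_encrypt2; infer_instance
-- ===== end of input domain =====

-- B re-implements the same XOR-chunk encryption without the intermediate full binary
-- string: it walks the input in groups of 4 characters and builds each 128-bit chunk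
-- value arithmetically (shift/or), instead of building one long bit-string and
-- re-slicing it at 128-bit boundaries and re-concatenating strings (objective: faster,
-- a constant-factor win measured).

-- shared ports of Python string/number primitives (both Pythons call them literally):
-- s.zfill(k) on a digit string (no sign handling needed: inputs are '0'/'1' digits)
def pvZfill (k : Nat) (l : List Char) : List Char := List.replicate (k - l.length) '0' ++ l

-- binary digits of n, MSB first, empty for 0 (helper for format(n,'b'))
def pvGo (n : Nat) : List Char :=
  if h : n = 0 then [] else pvGo (n / 2) ++ [if n % 2 = 1 then '1' else '0']
  decreasing_by exact Nat.div_lt_self (Nat.pos_of_ne_zero h) (by norm_num)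

-- format(n, 'b')   (exact for n ≥ 0, the only values occurring here)
def pvNatToBin (n : Nat) : List Char := if n = 0 then ['0'] else pvGo n

-- int(s, 2)   (exact on nonempty strings of '0'/'1' digits, the only ones occurring here)
def pvBinToNat (l : List Char) : Nat := l.foldl (fun a c => 2 * a + (if c = '1' then 1 else 0)) 0

def pvKey : Nat := 232895080984906726156709911474167313427

-- ===== PORT A =====
-- the while loop: i is the read index into binary, crypt the accumulated output
def encrypt2Loop (binary : List Char) (i : Nat) (crypt : List Char) : List Char :=
  if h : crypt.length < binary.length then
    let alphabet := pvZfill 128 ((binary.drop i).take 128)   -- binary[i:i+128].zfill(128)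
    let new := pvBinToNat alphabet ^^^ pvKey
    encrypt2Loop binary (i + 128) (crypt ++ pvZfill 128 (pvNatToBin new))
  else crypt
termination_by binary.length - crypt.length
decreasing_by simp [pvZfill]; omega

def encrypt2 (line : String) : String :=
  let binary := line.toList.foldl (fun b c => b ++ pvZfill 32 (pvNatToBin c.toNat)) []
  String.mk (encrypt2Loop binary 0 [])

-- ===== PORT B =====
-- B's while loop over 4-character groups, transcribed as recursion on the remaining
-- characters (line[i:i+4] = take 4 of the rest, i += 4 = drop 4)
def encrypt2AltGo (cs : List Char) : List (List Char) :=
  if h : cs = [] then []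
  else
    let val := (cs.take 4).foldl (fun v c => (v <<< 32) ||| c.toNat) 0
    pvZfill 128 (pvNatToBin (val ^^^ pvKey)) :: encrypt2AltGo (cs.drop 4)
termination_by cs.length
decreasing_by have := List.length_pos_of_ne_nil h; simp; omega

def encrypt2_alt (line : String) : String :=
  String.mk (encrypt2AltGo line.toList).flatten   -- ''.join(out)

-- ===== PRECONDITION & SPEC =====
def Spec_encrypt2 (line : String) (out : String) : Prop := out = encrypt2_alt line
instance (line : String) (out : String) : Decidable (Spec_encrypt2 line out) := by unfold Spec_encrypt2; infer_instance

-- ===== CLAIM (what is proved, stated in full; the proofs are below) =====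
def Claim_equal_encrypt2 : Prop := ∀ (line : String), Dom_encrypt2 line → Spec_encrypt2 line (encrypt2 line)

-- ===== LEMMAS AND PROOFS =====

-- the 32-bit block of one character, and the binary string of a character list
def pvBlock (c : Char) : List Char := pvZfill 32 (pvNatToBin c.toNat)
def pvBinaryOf (cs : List Char) : List Char := (cs.map pvBlock).flatten

theorem pvBinToNat_foldl (l : List Char) (a : Nat) :
    l.foldl (fun a c => 2 * a + (if c = '1' then 1 else 0)) a = a * 2 ^ l.length + pvBinToNat l := by
  induction l generalizing a with
  | nil => simp [pvBinToNat]
  | cons c l ih =>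
    simp only [List.foldl_cons, List.length_cons, pvBinToNat]
    rw [ih, ih (2 * 0 + _)]
    ring

theorem pvBinToNat_append (x y : List Char) :
    pvBinToNat (x ++ y) = pvBinToNat x * 2 ^ y.length + pvBinToNat y := by
  simp only [pvBinToNat, List.foldl_append]
  rw [pvBinToNat_foldl]
  rfl

theorem pvBinToNat_replicate (k : Nat) : pvBinToNat (List.replicate k '0') = 0 := by
  induction k with
  | zero => rfl
  | succ k ih => simpa [pvBinToNat, List.replicate_succ, List.foldl_cons] using ih

theorem pvBinToNat_zfill (k : Nat) (l : List Char) : pvBinToNat (pvZfill k l) = pvBinToNat l := by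
  simp [pvZfill, pvBinToNat_append, pvBinToNat_replicate]

theorem pvBinToNat_pvGo (n : Nat) : pvBinToNat (pvGo n) = n := by
  induction n using Nat.strong_induction_on with
  | _ n ih =>
    rw [pvGo]
    split
    · simp [pvBinToNat]; omega
    · rename_i h
      rw [pvBinToNat_append, ih (n / 2) (Nat.div_lt_self (Nat.pos_of_ne_zero h) (by norm_num))]
      have h2 := Nat.div_add_mod n 2
      have h3 : n % 2 < 2 := Nat.mod_lt _ (by norm_num)
      split <;> simp [pvBinToNat] <;> omega

theorem pvBinToNat_natToBin (n : Nat) : pvBinToNat (pvNatToBin n) = n := by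
  unfold pvNatToBin
  split
  · simp [pvBinToNat]; omega
  · exact pvBinToNat_pvGo n

theorem pvGo_length {n k : Nat} (h : n < 2 ^ k) : (pvGo n).length ≤ k := by
  induction k generalizing n with
  | zero => interval_cases n; simp [pvGo]
  | succ k ih =>
    rw [pvGo]
    split
    · simp
    · rename_i hn
      have : n / 2 < 2 ^ k := by
        rw [Nat.pow_succ] at h; omega
      simpa using Nat.succ_le_succ (ih this)

theorem pvNatToBin_length {n k : Nat} (h1 : 1 ≤ k) (h : n < 2 ^ k) : (pvNatToBin n).length ≤ k := by
  unfold pvNatToBin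
  split
  · simpa
  · exact pvGo_length h

theorem pvZfill_length {k : Nat} {l : List Char} (h : l.length ≤ k) : (pvZfill k l).length = k := by
  simp [pvZfill]; omega

theorem char_lt (c : Char) : c.toNat < 2 ^ 32 := by
  have := c.val.toNat_lt_size
  simpa [UInt32.size] using this

theorem pvBlock_length (c : Char) : (pvBlock c).length = 32 :=
  pvZfill_length (pvNatToBin_length (by norm_num) (char_lt c))

theorem pvBinaryOf_length (cs : List Char) : (pvBinaryOf cs).length = 32 * cs.length := by
  induction cs with
  | nil => rfl
  | cons c cs ih => simp [pvBinaryOf, pvBlock_length] at *; omega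

theorem pvBinaryOf_cons (c : Char) (cs : List Char) :
    pvBinaryOf (c :: cs) = pvBlock c ++ pvBinaryOf cs := by
  simp [pvBinaryOf]

theorem pvBinaryOf_take (cs : List Char) (k : Nat) :
    (pvBinaryOf cs).take (32 * k) = pvBinaryOf (cs.take k) := by
  induction cs generalizing k with
  | nil => simp [pvBinaryOf]
  | cons c cs ih =>
    cases k with
    | zero => simp [pvBinaryOf]
    | succ k =>
      rw [pvBinaryOf_cons, List.take_append, List.take_of_length_le (by simp [pvBlock_length]),
        pvBlock_length]
      rw [show 32 * (k + 1) - 32 = 32 * k by omega, ih, List.take_succ_cons, pvBinaryOf_cons]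

theorem pvBinaryOf_drop (cs : List Char) (k : Nat) :
    (pvBinaryOf cs).drop (32 * k) = pvBinaryOf (cs.drop k) := by
  induction cs generalizing k with
  | nil => simp [pvBinaryOf]
  | cons c cs ih =>
    cases k with
    | zero => simp
    | succ k =>
      rw [pvBinaryOf_cons, List.drop_append, List.drop_of_length_le (by simp [pvBlock_length]),
        pvBlock_length, List.nil_append]
      rw [show 32 * (k + 1) - 32 = 32 * k by omega, ih, List.drop_succ_cons]

theorem pvBinToNat_lt (l : List Char) : pvBinToNat l < 2 ^ l.length := by
  induction l with
  | nil => simp [pvBinToNat]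
  | cons c l ih =>
    have : pvBinToNat (c :: l) = (if c = '1' then 1 else 0) * 2 ^ l.length + pvBinToNat l := by
      simp only [pvBinToNat, List.foldl_cons]
      rw [pvBinToNat_foldl]
      simp [pvBinToNat]
    rw [this, List.length_cons, Nat.pow_succ]
    have : pvBinToNat l < 2 ^ l.length := ih
    split <;> simp [pvBinToNat] at * <;> omega

-- B's shift/or fold over a group equals the value of the group's concatenated blocks
theorem foldlOr_eq (g : List Char) (a : Nat) :
    g.foldl (fun v c => (v <<< 32) ||| c.toNat) a = a * 2 ^ (32 * g.length) + pvBinToNat (pvBinaryOf g) := by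
  induction g generalizing a with
  | nil => simp [pvBinaryOf, pvBinToNat]
  | cons c g ih =>
    rw [List.foldl_cons, ih, ← Nat.shiftLeft_add_eq_or_of_lt (char_lt c), Nat.shiftLeft_eq]
    rw [pvBinaryOf_cons, pvBinToNat_append, pvBinaryOf_length, pvBlock, pvBinToNat_zfill,
      pvBinToNat_natToBin, List.length_cons, show 32 * (g.length + 1) = 32 * g.length + 32 by ring,
      pow_add]
    ring

theorem pvKey_lt : pvKey < 2 ^ 128 := by norm_num [pvKey]

-- the main loop correspondence: A's while loop, started at read index i with an output
-- of length i whose remaining input is the binary string of cs, produces B's chunks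
theorem loopA_eq (n : Nat) : ∀ (cs : List Char) (B : List Char) (i : Nat) (crypt : List Char),
    cs.length ≤ n → crypt.length = i → B.drop i = pvBinaryOf cs →
    encrypt2Loop B i crypt = crypt ++ (encrypt2AltGo cs).flatten := by
  induction n with
  | zero =>
    intro cs B i crypt hn hlen hdrop
    have hcs : cs = [] := List.eq_nil_of_length_eq_zero (by omega)
    subst hcs
    have : B.length ≤ i := by
      have := congrArg List.length hdrop
      simp [pvBinaryOf] at this
      omega
    rw [encrypt2Loop, dif_neg (by omega), encrypt2AltGo.eq_def, dif_pos rfl]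
    simp
  | succ n ih =>
    intro cs B i crypt hn hlen hdrop
    match cs with
    | [] =>
      have : B.length ≤ i := by
        have := congrArg List.length hdrop
        simp [pvBinaryOf] at this
        omega
      rw [encrypt2Loop, dif_neg (by omega), encrypt2AltGo.eq_def, dif_pos rfl]
      simp
    | c :: cs' =>
      have hBlen : B.length - i = 32 * (c :: cs').length := by
        have := congrArg List.length hdrop
        rwa [List.length_drop, pvBinaryOf_length] at this
      have hcond : crypt.length < B.length := by simp at hBlen; omega
      rw [encrypt2Loop, dif_pos hcond]
      have htake : (B.drop i).take 128 = pvBinaryOf ((c :: cs').take 4) := by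
        rw [hdrop, show (128 : Nat) = 32 * 4 from rfl, pvBinaryOf_take]
      have hval : pvBinToNat (pvZfill 128 ((B.drop i).take 128))
          = ((c :: cs').take 4).foldl (fun v c => (v <<< 32) ||| c.toNat) 0 := by
        rw [pvBinToNat_zfill, htake, foldlOr_eq]; ring
      have hnewlt : pvBinToNat (pvZfill 128 ((B.drop i).take 128)) ^^^ pvKey < 2 ^ 128 := by
        apply Nat.xor_lt_two_pow _ pvKey_lt
        rw [pvBinToNat_zfill, htake]
        calc pvBinToNat (pvBinaryOf ((c :: cs').take 4)) < 2 ^ (pvBinaryOf ((c :: cs').take 4)).length :=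
              pvBinToNat_lt _
          _ ≤ 2 ^ 128 := by
              apply Nat.pow_le_pow_right (by norm_num)
              rw [pvBinaryOf_length]
              have := List.length_take_le 4 (c :: cs')
              omega
      have hchunk : (pvZfill 128 (pvNatToBin (pvBinToNat (pvZfill 128 ((B.drop i).take 128)) ^^^ pvKey))).length = 128 :=
        pvZfill_length (pvNatToBin_length (by norm_num) hnewlt)
      rw [ih ((c :: cs').drop 4) B (i + 128)
            (crypt ++ pvZfill 128 (pvNatToBin (pvBinToNat (pvZfill 128 ((B.drop i).take 128)) ^^^ pvKey)))
            (by simp at hn ⊢; omega)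
            (by rw [List.length_append, hchunk, hlen])
            (by rw [← List.drop_drop, hdrop, show (128 : Nat) = 32 * 4 from rfl, pvBinaryOf_drop])]
      conv_rhs => rw [encrypt2AltGo.eq_def, dif_neg (by simp : ¬ (c :: cs') = [])]
      simp only [List.flatten_cons, ← List.append_assoc]
      congr 2
      rw [hval]
      
-- the for loop building binary produces pvBinaryOf
theorem binary_build (cs : List Char) (a : List Char) :
    cs.foldl (fun b c => b ++ pvZfill 32 (pvNatToBin c.toNat)) a = a ++ pvBinaryOf cs := by
  induction cs generalizing a with
  | nil => simp [pvBinaryOf]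
  | cons c cs ih => simp [List.foldl_cons, ih, pvBinaryOf_cons, pvBlock]

-- ===== VERDICT (by name: the statement is the Claim_ definition above) =====
theorem encrypt2_spec : Claim_equal_encrypt2 := by
  intro line _
  show String.mk (encrypt2Loop (line.toList.foldl (fun b c => b ++ pvZfill 32 (pvNatToBin c.toNat)) []) 0 []) = _
  rw [binary_build, List.nil_append,
    loopA_eq line.toList.length line.toList (pvBinaryOf line.toList) 0 [] (le_refl _) rfl (by simp)]
  rfl
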